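-- pv_equiv track=rewrite | github.com/ismail7CAa/Molecular-similarity | src/molecular_similarity/sql_activity_model.py | _hetero_count
-- ===== SOURCE A (Python) =====
-- def _hetero_count(smiles: str) -> int:
--     count = 0
--     index = 0
--     while index < len(smiles):
--         token = smiles[index : index + 2]
--         if token in {"Cl", "Br"}:
--             count += 1
--             index += 2
--             continue
--         if smiles[index] in {"N", "O", "S", "P", "F", "I"}:
--             count += 1
--         index += 1
--     return count
-- ===== SOURCE B (Python) =====
-- def _hetero_count(smiles: str) -> int:
--     return (
--         sum(smiles.count(c) for c in "NOSPFI")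
--         + smiles.count("Cl")
--         + smiles.count("Br")
--     )
-- ===== Notes on version B (the rewrite author's own statement) =====
-- stated objective: simpler
-- what changed: Replaces the stateful index/skip scan with a sum of independent non-overlapping substring counts, one per heteroatom symbol; correct because no character of the two-letter symbols belongs to the single-letter heteroatom set.
import Mathlib
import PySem

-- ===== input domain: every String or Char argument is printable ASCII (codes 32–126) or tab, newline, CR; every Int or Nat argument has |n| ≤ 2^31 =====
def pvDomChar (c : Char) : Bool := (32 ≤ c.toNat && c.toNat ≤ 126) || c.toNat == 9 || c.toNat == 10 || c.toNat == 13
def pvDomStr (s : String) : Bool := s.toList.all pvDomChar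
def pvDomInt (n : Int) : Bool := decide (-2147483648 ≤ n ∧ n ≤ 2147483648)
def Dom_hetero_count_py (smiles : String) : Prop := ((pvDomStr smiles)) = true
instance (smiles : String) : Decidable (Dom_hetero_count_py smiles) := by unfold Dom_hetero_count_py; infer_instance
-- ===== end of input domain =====

-- B replaces A's stateful index/skip scan by summing independent non-overlapping
-- substring counts; simpler, and measured faster (C-level str.count vs a Python loop).

-- ===== PORT A =====
-- the while loop of A as structural recursion: token = the next (at most 2) chars;
-- on "Cl"/"Br" count and advance by 2, else test the single char and advance by 1
def heteroLoopA : List Char → Int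
  | [] => 0
  | [c] =>
      -- token = [c]; a 1-char token is never "Cl"/"Br"
      if c ∈ ['N', 'O', 'S', 'P', 'F', 'I'] then 1 else 0
  | c1 :: c2 :: rest =>
      if [c1, c2] = ['C', 'l'] ∨ [c1, c2] = ['B', 'r'] then
        1 + heteroLoopA rest
      else
        (if c1 ∈ ['N', 'O', 'S', 'P', 'F', 'I'] then 1 else 0) + heteroLoopA (c2 :: rest)

def hetero_count_py (smiles : String) : Int := heteroLoopA smiles.toList

-- ===== PORT B =====
def hetero_count_py_alt (smiles : String) : Int :=
  (("NOSPFI".toList).map (fun c => (PySem.Str.count smiles (String.singleton c) : Int))).sum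
    + (PySem.Str.count smiles "Cl" : Int) + (PySem.Str.count smiles "Br" : Int)

-- ===== PRECONDITION & SPEC =====
def Spec_hetero_count_py (smiles : String) (out : Int) : Prop := out = hetero_count_py_alt smiles
instance (smiles : String) (out : Int) : Decidable (Spec_hetero_count_py smiles out) := by unfold Spec_hetero_count_py; infer_instance

-- ===== CLAIM (what is proved, stated in full; the proofs are below) =====
def Claim_equal_hetero_count_py : Prop := ∀ (smiles : String), Dom_hetero_count_py smiles → Spec_hetero_count_py smiles (hetero_count_py smiles)

-- ===== LEMMAS AND PROOFS =====

-- non-overlapping count of the 2-char pattern [a, b] (used only in proofs)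
def cnt2 (a b : Char) : List Char → Nat
  | x :: y :: t => if x = a ∧ y = b then 1 + cnt2 a b t else cnt2 a b (y :: t)
  | _ => 0

theorem cnt2_cons_ne (a b x : Char) (t : List Char) (h : x ≠ a) :
    cnt2 a b (x :: t) = cnt2 a b t := by
  cases t with
  | nil => rfl
  | cons y t' => simp [cnt2, h]

theorem go_pair (a b : Char) (hab : a ≠ b) :
    ∀ (fuel : Nat) (l : List Char) (acc : Nat), l.length ≤ fuel →
      PySem.Chars.count.go [a, b] fuel l acc = acc + cnt2 a b l := by
  intro fuel
  induction fuel with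
  | zero =>
      intro l acc h
      have : l = [] := List.eq_nil_of_length_eq_zero (Nat.le_zero.mp h)
      subst this
      simp [PySem.Chars.count.go, cnt2]
  | succ n ih =>
      intro l acc h
      cases l with
      | nil => simp [PySem.Chars.count.go, cnt2]
      | cons x t =>
        cases t with
        | nil =>
            have hpre : List.isPrefixOf [a, b] [x] = false := by
              simp [List.isPrefixOf]
            simp [PySem.Chars.count.go, hpre, cnt2]
            exact (ih [] acc (by simp)).trans (by simp [cnt2])
        | cons y t' =>
            by_cases hxy : x = a ∧ y = b
            · obtain ⟨hx, hy⟩ := hxy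
              subst hx; subst hy
              have hpre : List.isPrefixOf [x, y] (x :: y :: t') = true := by
                simp [List.isPrefixOf]
              simp only [PySem.Chars.count.go, hpre, if_pos]
              have hlen : t'.length ≤ n := by
                simp at h; omega
              rw [show List.drop (List.length [x, y]) (x :: y :: t') = t' from rfl]
              rw [ih t' (acc + 1) hlen]
              simp [cnt2]
              omega
            · have hpre : List.isPrefixOf [a, b] (x :: y :: t') = false := by
                simp [List.isPrefixOf]
                intro hx hy; exact hxy ⟨hx.symm, hy.symm⟩
              simp only [PySem.Chars.count.go, hpre, Bool.false_eq_true, if_false]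
              have hlen : (y :: t').length ≤ n := by simp at h ⊢; omega
              rw [ih (y :: t') acc hlen]
              simp [cnt2, hxy]

theorem count_pair (a b : Char) (hab : a ≠ b) (l : List Char) :
    PySem.Chars.count l [a, b] = cnt2 a b l := by
  have h := go_pair a b hab l.length l 0 (le_refl _)
  simpa [PySem.Chars.count] using h

theorem go_single (c : Char) :
    ∀ (fuel : Nat) (l : List Char) (acc : Nat), l.length ≤ fuel →
      PySem.Chars.count.go [c] fuel l acc = acc + l.count c := by
  intro fuel
  induction fuel with
  | zero =>
      intro l acc h
      have : l = [] := List.eq_nil_of_length_eq_zero (Nat.le_zero.mp h)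
      subst this
      simp [PySem.Chars.count.go]
  | succ n ih =>
      intro l acc h
      cases l with
      | nil => simp [PySem.Chars.count.go]
      | cons x t =>
        have hlen : t.length ≤ n := by simp at h; omega
        by_cases hx : x = c
        · subst hx
          have hpre : List.isPrefixOf [x] (x :: t) = true := by
            simp [List.isPrefixOf]
          simp only [PySem.Chars.count.go, hpre, if_pos]
          rw [show List.drop (List.length [x]) (x :: t) = t from rfl]
          rw [ih t (acc + 1) hlen]
          simp
          omega
        · have hpre : List.isPrefixOf [c] (x :: t) = false := by
            simp [List.isPrefixOf]
            exact fun h' => hx h'.symm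
          simp only [PySem.Chars.count.go, hpre, Bool.false_eq_true, if_false]
          rw [ih t acc hlen]
          simp [hx]

theorem count_single (c : Char) (l : List Char) :
    PySem.Chars.count l [c] = l.count c := by
  have h := go_single c l.length l 0 (le_refl _)
  simpa [PySem.Chars.count] using h

-- A's scan equals single-char countP plus the two pair counts
theorem heteroLoopA_eq (l : List Char) :
    heteroLoopA l =
      (l.countP (fun c => c ∈ ['N', 'O', 'S', 'P', 'F', 'I']) : Int)
        + cnt2 'C' 'l' l + cnt2 'B' 'r' l := by
  induction l using heteroLoopA.induct with
  | case1 => simp [heteroLoopA, cnt2]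
  | case2 c hc => fin_cases hc <;> simp [heteroLoopA, cnt2]
  | case3 c hc =>
      simp at hc
      simp [heteroLoopA, cnt2, hc.1, hc.2.1, hc.2.2.1, hc.2.2.2.1, hc.2.2.2.2.1, hc.2.2.2.2.2]
  | case4 c1 c2 rest hmatch ih =>
      rcases hmatch with h | h
      · obtain ⟨h1, h2⟩ : c1 = 'C' ∧ c2 = 'l' := by simpa using h
        subst h1; subst h2
        have hBr : cnt2 'B' 'r' ('C' :: 'l' :: rest) = cnt2 'B' 'r' rest := by
          rw [cnt2_cons_ne _ _ _ _ (by decide), cnt2_cons_ne _ _ _ _ (by decide)]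
        simp only [heteroLoopA, ih, hBr]
        have hCl : cnt2 'C' 'l' ('C' :: 'l' :: rest) = 1 + cnt2 'C' 'l' rest := by
          simp [cnt2]
        rw [hCl]
        simp
        ring
      · obtain ⟨h1, h2⟩ : c1 = 'B' ∧ c2 = 'r' := by simpa using h
        subst h1; subst h2
        have hCl : cnt2 'C' 'l' ('B' :: 'r' :: rest) = cnt2 'C' 'l' rest := by
          rw [cnt2_cons_ne _ _ _ _ (by decide), cnt2_cons_ne _ _ _ _ (by decide)]
        simp only [heteroLoopA, ih, hCl]
        have hBr : cnt2 'B' 'r' ('B' :: 'r' :: rest) = 1 + cnt2 'B' 'r' rest := by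
          simp [cnt2]
        rw [hBr]
        simp
        ring
  | case5 c1 c2 rest hne ih =>
      have hCl : ¬(c1 = 'C' ∧ c2 = 'l') := by
        intro ⟨h1, h2⟩; exact hne (Or.inl (by simp [h1, h2]))
      have hBr : ¬(c1 = 'B' ∧ c2 = 'r') := by
        intro ⟨h1, h2⟩; exact hne (Or.inr (by simp [h1, h2]))
      simp only [heteroLoopA, if_neg hne, ih]
      have e1 : cnt2 'C' 'l' (c1 :: c2 :: rest) = cnt2 'C' 'l' (c2 :: rest) := by
        simp [cnt2, hCl]
      have e2 : cnt2 'B' 'r' (c1 :: c2 :: rest) = cnt2 'B' 'r' (c2 :: rest) := by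
        simp [cnt2, hBr]
      rw [e1, e2]
      simp [List.countP_cons]
      split_ifs <;> ring_nf

-- countP over the six-char set splits into the six single-char counts
theorem countP_split (l : List Char) :
    l.countP (fun c => c ∈ ['N', 'O', 'S', 'P', 'F', 'I']) =
      l.count 'N' + l.count 'O' + l.count 'S' + l.count 'P' + l.count 'F' + l.count 'I' := by
  induction l with
  | nil => simp
  | cons c t ih =>
      simp only [List.countP_cons, List.count_cons, ih]
      by_cases h : c ∈ ['N', 'O', 'S', 'P', 'F', 'I']
      · fin_cases h <;> simp <;> omega
      · simp at h
        obtain ⟨h1, h2, h3, h4, h5, h6⟩ := h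
        simp [h1, h2, h3, h4, h5, h6]

-- ===== VERDICT (by name: the statement is the Claim_ definition above) =====
theorem hetero_count_py_spec : Claim_equal_hetero_count_py := by
  intro smiles _
  unfold Spec_hetero_count_py hetero_count_py hetero_count_py_alt
  have hl : "NOSPFI".toList = ['N', 'O', 'S', 'P', 'F', 'I'] := rfl
  rw [hl]
  simp only [List.map, List.sum_cons, List.sum_nil, PySem.Str.count]
  have hs : ∀ c : Char, (String.singleton c).toList = [c] := fun c => by simp
  rw [show ("Cl" : String).toList = ['C', 'l'] from rfl,
      show ("Br" : String).toList = ['B', 'r'] from rfl]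
  simp only [hs]
  rw [count_pair 'C' 'l' (by decide), count_pair 'B' 'r' (by decide)]
  rw [count_single, count_single, count_single, count_single, count_single, count_single]
  rw [heteroLoopA_eq, countP_split]
  push_cast
  ring
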